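-- pv_equiv track=rewrite | github.com/petteriTeikari/deep-biblio-tools | src/utils/extractors.py | extract_urls_from_markdown
-- ===== SOURCE A (Python) =====
-- def extract_urls_from_markdown(text: str) -> list[tuple]:
--     """
--     Extract URLs from markdown link syntax.
--
--     Args:
--         text: Markdown text
--
--     Returns:
--         List of (link_text, url) tuples
--     """
--     links = []
--     i = 0
--     while i < len(text):
--         # Find opening [
--         bracket_start = text.find("[", i)
--         if bracket_start == -1:
--             break
--
--         # Find closing ]
--         bracket_end = text.find("]", bracket_start + 1)
--         if bracket_end == -1:
--             i = bracket_start + 1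
--             continue
--
--         # Check if followed by (
--         if bracket_end + 1 < len(text) and text[bracket_end + 1] == "(":
--             # Find closing )
--             paren_end = text.find(")", bracket_end + 2)
--             if paren_end == -1:
--                 i = bracket_end + 1
--                 continue
--
--             # Extract link text and URL
--             link_text = text[bracket_start + 1 : bracket_end]
--             url = text[bracket_end + 2 : paren_end]
--             links.append((link_text, url))
--             i = paren_end + 1
--         else:
--             i = bracket_end + 1
--
--     return links
-- ===== SOURCE B (Python) =====
-- import re
--
-- _LINK_RE = re.compile(r'\[([^\]]*)\]\(([^)]*)\)')
--
--
-- def extract_urls_from_markdown(text: str) -> list[tuple]: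
--     """Extract (link_text, url) pairs from markdown links in one regex pass."""
--     return _LINK_RE.findall(text)
-- ===== Notes on version B (the rewrite author's own statement) =====
-- stated objective: idiomatic
-- what changed: Replaced the hand-rolled while-loop with manual index bookkeeping (str.find for '[', ']', ')' and explicit resume positions) by a single re.findall pass with the pattern \[([^\]]*)\]\(([^)]*)\), whose negated character classes reproduce the original first-closing-bracket / first-closing-paren search semantics.
import Mathlib
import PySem

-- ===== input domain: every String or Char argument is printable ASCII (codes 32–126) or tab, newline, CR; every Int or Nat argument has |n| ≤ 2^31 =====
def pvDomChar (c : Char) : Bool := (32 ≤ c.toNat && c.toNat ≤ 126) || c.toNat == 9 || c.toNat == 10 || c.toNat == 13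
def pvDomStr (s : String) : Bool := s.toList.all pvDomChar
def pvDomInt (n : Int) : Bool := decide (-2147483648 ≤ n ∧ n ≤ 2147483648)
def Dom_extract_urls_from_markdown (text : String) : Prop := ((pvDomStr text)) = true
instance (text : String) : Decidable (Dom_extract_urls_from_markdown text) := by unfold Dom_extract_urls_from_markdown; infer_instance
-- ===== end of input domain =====

-- B replaces A's hand-rolled index/find while-loop by a single regex pass (re.findall);
-- objective: idiomatic. Port B below is an exact hand-port of that regex's matching
-- semantics (the scanner the regex engine runs for this fixed link pattern).

-- ===== PORT A =====
-- fuel-based transliteration of A's while loop (i strictly increases, so len+1 steps suffice)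
def pvLoopA (text : String) (fuel : Nat) (i : Int) (links : List (String × String)) : List (String × String) :=
  match fuel with
  | 0 => links
  | Nat.succ fuel =>
    if i < PySem.Str.len text then
      let bracket_start := PySem.Str.findFrom text "[" i
      if bracket_start = -1 then links
      else
        let bracket_end := PySem.Str.findFrom text "]" (bracket_start + 1)
        if bracket_end = -1 then pvLoopA text fuel (bracket_start + 1) links
        else
          if bracket_end + 1 < PySem.Str.len text ∧ PySem.Str.pyGet? text (bracket_end + 1) = some '(' then
            let paren_end := PySem.Str.findFrom text ")" (bracket_end + 2)
            if paren_end = -1 then pvLoopA text fuel (bracket_end + 1) links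
            else
              let link_text := PySem.Str.slice text (some (bracket_start + 1)) (some bracket_end)
              let url := PySem.Str.slice text (some (bracket_end + 2)) (some paren_end)
              pvLoopA text fuel (paren_end + 1) (links ++ [(link_text, url)])
          else pvLoopA text fuel (bracket_end + 1) links
    else links

def extract_urls_from_markdown (text : String) : List (String × String) :=
  pvLoopA text (text.toList.length + 1) 0 []

-- ===== PORT B =====
-- pvGrabUntil c l: what the regex fragment `[^c]*c` consumes from l: none if c never occurs,
-- otherwise (the chars before the first c, the rest after that c).
def pvGrabUntil (c : Char) : List Char → Option (List Char × List Char)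
  | [] => none
  | x :: xs =>
    if x = c then some ([], xs)
    else
      match pvGrabUntil c xs with
      | none => none
      | some (a, b) => some (x :: a, b)

lemma pvGrabUntil_length {c : Char} : ∀ {l a b : List Char},
    pvGrabUntil c l = some (a, b) → b.length < l.length := by
  intro l
  induction l with
  | nil => intro a b h; simp [pvGrabUntil] at h
  | cons x xs ih =>
    intro a b h
    simp only [pvGrabUntil] at h
    by_cases hx : x = c
    · simp [hx] at h
      simp [← h.2, List.length_cons]
    · simp [hx] at h
      cases hg : pvGrabUntil c xs with
      | none => rw [hg] at h; simp at h
      | some p =>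
        rw [hg] at h
        obtain ⟨a', b'⟩ := p
        simp at h
        have := ih hg
        simp [← h.2]; omega

-- pvScan: the regex engine's left-to-right scan for the fixed pattern \[([^\]]*)\]\(([^)]*)\):
-- at a '[' try to complete a match; on success emit the groups and resume after the ')';
-- on failure (or on any other char) advance one position.
def pvScan : List Char → List (String × String)
  | [] => []
  | c :: rest =>
    if c = '[' then
      match h1 : pvGrabUntil ']' rest with
      | some (txt, '(' :: rest3) =>
        match h2 : pvGrabUntil ')' rest3 with
        | some (url, rest4) => (String.ofList txt, String.ofList url) :: pvScan rest4
        | none => pvScan rest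
      | _ => pvScan rest
    else pvScan rest
  termination_by l => l.length
  decreasing_by
  · have t1 := pvGrabUntil_length h1
    have t2 := pvGrabUntil_length h2
    simp at t1 ⊢; omega
  all_goals simp

def extract_urls_from_markdown_alt (text : String) : List (String × String) :=
  pvScan text.toList

-- ===== PRECONDITION & SPEC =====
def Spec_extract_urls_from_markdown (text : String) (out : List (String × String)) : Prop := out = extract_urls_from_markdown_alt text
instance (text : String) (out : List (String × String)) : Decidable (Spec_extract_urls_from_markdown text out) := by unfold Spec_extract_urls_from_markdown; infer_instance

-- ===== CLAIM (what is proved, stated in full; the proofs are below) =====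
def Claim_equal_extract_urls_from_markdown : Prop := ∀ (text : String), Dom_extract_urls_from_markdown text → Spec_extract_urls_from_markdown text (extract_urls_from_markdown text)

-- ===== LEMMAS AND PROOFS =====

-- generic takeWhile/dropWhile facts

lemma pvDropWhile_eq_drop {α} (p : α → Bool) (l : List α) :
    l.dropWhile p = l.drop (l.takeWhile p).length := by
  induction l with
  | nil => simp
  | cons x xs ih =>
    by_cases hx : p x
    · simp [List.takeWhile_cons, hx, ih]
    · simp [List.dropWhile_cons, hx]

lemma pvDropWhile_mem {c : Char} : ∀ {l : List Char}, c ∈ l →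
    l.dropWhile (· ≠ c) = c :: (l.dropWhile (· ≠ c)).tail := by
  intro l
  induction l with
  | nil => intro h; simp at h
  | cons x xs ih =>
    intro h
    by_cases hx : x = c
    · subst hx; simp
    · have hc : c ∈ xs := by
        rcases List.mem_cons.mp h with h' | h'
        · exact absurd h'.symm hx
        · exact h'
      have := ih hc
      simpa [List.dropWhile_cons, hx] using this

lemma pvNotMem_takeWhile {c : Char} {l : List Char} : c ∉ l.takeWhile (· ≠ c) := by
  intro h
  have := List.mem_takeWhile_imp h
  simp at this

lemma pvTakeWhile_append_all {α} {p : α → Bool} {pre : List α} (l : List α)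
    (h : ∀ x ∈ pre, p x) : (pre ++ l).takeWhile p = pre ++ l.takeWhile p := by
  induction pre with
  | nil => simp
  | cons x xs ih =>
    simp only [List.cons_append, List.takeWhile_cons]
    rw [h x (by simp)]
    simp [ih fun y hy => h y (by simp [hy])]

lemma pvDropWhile_append_all {α} {p : α → Bool} {pre : List α} (l : List α)
    (h : ∀ x ∈ pre, p x) : (pre ++ l).dropWhile p = l.dropWhile p := by
  induction pre with
  | nil => simp
  | cons x xs ih =>
    simp only [List.cons_append, List.dropWhile_cons]
    rw [h x (by simp)]
    simp [ih fun y hy => h y (by simp [hy])]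

-- single-character find characterisation

lemma pvSingleton_prefix_iff {c : Char} {m : List Char} :
    [c] <+: m ↔ ∃ t, m = c :: t := by
  constructor
  · rintro ⟨t, rfl⟩
    exact ⟨t, rfl⟩
  · rintro ⟨t, rfl⟩
    exact ⟨t, rfl⟩

lemma pvSingleton_infix_iff {c : Char} {l : List Char} :
    [c] <:+: l ↔ c ∈ l := by
  constructor
  · intro h
    exact h.sublist.mem (by simp)
  · intro h
    obtain ⟨s, t, rfl⟩ := List.append_of_mem h
    exact ⟨s, t, by simp⟩

lemma pvFind_singleton (l : List Char) (c : Char) :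
    PySem.Chars.find l [c] = if c ∈ l then ((l.takeWhile (· ≠ c)).length : Int) else -1 := by
  by_cases h : c ∈ l
  · rw [if_pos h]
    have hinf : [c] <:+: l := pvSingleton_infix_iff.mpr h
    have hnn : 0 ≤ PySem.Chars.find l [c] := (PySem.Chars.find_nonneg_iff l [c]).mpr hinf
    obtain ⟨hpre, hmin⟩ := PySem.Chars.find_spec hnn
    set j := (PySem.Chars.find l [c]).toNat with hj
    set t := (l.takeWhile (· ≠ c)).length with ht
    have hdrop_t : l.drop t = c :: (l.dropWhile (· ≠ c)).tail := by
      rw [← pvDropWhile_eq_drop]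
      exact pvDropWhile_mem h
    have hpre_t : [c] <+: l.drop t := by
      rw [hdrop_t]; exact ⟨_, rfl⟩
    have hjt : j ≤ t := by
      by_contra hlt
      exact hmin t (by omega) hpre_t
    have hjt' : j = t := by
      rcases Nat.eq_or_lt_of_le hjt with h' | h'
      · exact h'
      · exfalso
        obtain ⟨tl, htl⟩ := pvSingleton_prefix_iff.mp hpre
        have hcj : c ∈ l.takeWhile (· ≠ c) := by
          have hjlen : j < l.length := by
            have : l.drop j ≠ [] := by rw [htl]; simp
            by_contra hje
            exact this (List.drop_eq_nil_of_le (by omega))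
          have hget : l[j]? = some c := by
            have := congrArg List.head? htl
            rwa [List.head?_drop] at this
          obtain ⟨r, hr⟩ := List.takeWhile_prefix (l := l) (p := (· ≠ c))
          rw [← hr, List.getElem?_append_left (by omega)] at hget
          exact List.mem_of_getElem? hget
        exact pvNotMem_takeWhile hcj
    have : PySem.Chars.find l [c] = (j : Int) := by omega
    rw [this, hjt']
  · rw [if_neg h]
    exact (PySem.Chars.find_eq_neg_one_iff l [c]).mpr (fun hi => h (pvSingleton_infix_iff.mp hi))

-- pvGrabUntil characterisation

lemma pvGrabUntil_spec (c : Char) (l : List Char) :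
    pvGrabUntil c l =
      if c ∈ l then some (l.takeWhile (· ≠ c), (l.dropWhile (· ≠ c)).tail) else none := by
  induction l with
  | nil => simp [pvGrabUntil]
  | cons x xs ih =>
    by_cases hx : x = c
    · subst hx
      simp [pvGrabUntil]
    · rw [pvGrabUntil]
      rw [if_neg hx, ih]
      by_cases hc : c ∈ xs
      · rw [if_pos hc, if_pos (by simp [hc]), List.takeWhile_cons, List.dropWhile_cons]
        simp [hx]
      · rw [if_neg hc, if_neg (by simp [hc]; exact fun h => hx h.symm)]

-- pvScan unfolding lemmas

lemma pvScan_nil : pvScan [] = [] := by rw [pvScan]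

lemma pvScan_skip {c : Char} {l : List Char} (h : c ≠ '[') :
    pvScan (c :: l) = pvScan l := by
  rw [pvScan, if_neg h]

lemma pvScan_bracket_none {rest : List Char} (h : pvGrabUntil ']' rest = none) :
    pvScan ('[' :: rest) = pvScan rest := by
  rw [pvScan, if_pos rfl]
  split <;> simp_all

lemma pvScan_bracket_noparen {rest txt rest2 : List Char}
    (h : pvGrabUntil ']' rest = some (txt, rest2)) (h2 : ∀ r3, rest2 ≠ '(' :: r3) :
    pvScan ('[' :: rest) = pvScan rest := by
  rw [pvScan, if_pos rfl]
  split
  · next txt' rest3' heq =>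
      have e := h.symm.trans heq
      simp only [Option.some.injEq, Prod.mk.injEq] at e
      exact absurd e.2 (h2 _)
  · rfl

lemma pvScan_paren_none {rest txt rest3 : List Char}
    (h : pvGrabUntil ']' rest = some (txt, '(' :: rest3))
    (h2 : pvGrabUntil ')' rest3 = none) :
    pvScan ('[' :: rest) = pvScan rest := by
  rw [pvScan, if_pos rfl]
  split
  · next txt' rest3' heq =>
      have e := h.symm.trans heq
      simp only [Option.some.injEq, Prod.mk.injEq, List.cons.injEq] at e
      obtain ⟨e1, -, e2⟩ := e
      subst e1
      subst e2
      split
      · next url2 rest42 heq2 =>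
          rw [h2] at heq2
          exact absurd heq2 (by simp)
      · rfl
  · next hno =>
      exact absurd h (by exact fun hh => hno _ _ hh)

lemma pvScan_match {rest txt rest3 url rest4 : List Char}
    (h : pvGrabUntil ']' rest = some (txt, '(' :: rest3))
    (h2 : pvGrabUntil ')' rest3 = some (url, rest4)) :
    pvScan ('[' :: rest) = (String.ofList txt, String.ofList url) :: pvScan rest4 := by
  rw [pvScan, if_pos rfl]
  split
  · next txt' rest3' heq =>
      have e := h.symm.trans heq
      simp only [Option.some.injEq, Prod.mk.injEq, List.cons.injEq] at e
      obtain ⟨e1, -, e2⟩ := e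
      subst e1
      subst e2
      split
      · next url2 rest42 heq2 =>
          have e' := h2.symm.trans heq2
          simp only [Option.some.injEq, Prod.mk.injEq] at e'
          obtain ⟨e3, e4⟩ := e'
          subst e3
          subst e4
          rfl
      · next heq2 =>
          rw [h2] at heq2
          exact absurd heq2 (by simp)
  · next hno =>
      exact absurd h (by exact fun hh => hno _ _ hh)

lemma pvScan_append_of_not_mem : ∀ {pre : List Char} (l : List Char), '[' ∉ pre →
    pvScan (pre ++ l) = pvScan l := by
  intro pre
  induction pre with
  | nil => simp
  | cons x xs ih =>
    intro l h
    simp only [List.mem_cons, not_or] at h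
    rw [List.cons_append, pvScan_skip (Ne.symm h.1)]
    exact ih l h.2

lemma pvScan_eq_nil_of_not_mem {l : List Char} (h : '[' ∉ l) : pvScan l = [] := by
  have := pvScan_append_of_not_mem (pre := l) [] h
  simpa [pvScan_nil] using this

-- skipping past a bracket whose match fails

lemma pvScan_fail_skip : ∀ {pre : List Char} (rest2 : List Char), ']' ∉ pre →
    ((∀ r3, rest2 ≠ '(' :: r3) ∨ (∃ r3, rest2 = '(' :: r3 ∧ ')' ∉ r3)) →
    pvScan (pre ++ ']' :: rest2) = pvScan (']' :: rest2) := by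
  intro pre
  induction pre with
  | nil => intro rest2 _ _; rfl
  | cons x xs ih =>
    intro rest2 hpre hfail
    have hxs : ']' ∉ xs := fun h => hpre (by simp [h])
    by_cases hx : x = '['
    · subst hx
      rw [List.cons_append]
      have hgrab : pvGrabUntil ']' (xs ++ ']' :: rest2) = some (xs, rest2) := by
        rw [pvGrabUntil_spec, if_pos (by simp)]
        rw [pvTakeWhile_append_all _ (fun y hy => by simp; exact fun h => hxs (h ▸ hy)),
            pvDropWhile_append_all _ (fun y hy => by simp; exact fun h => hxs (h ▸ hy))]
        simp
      rcases hfail with hf | ⟨r3, hr3, hnr⟩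
      · rw [pvScan_bracket_noparen hgrab hf]
        exact ih rest2 hxs (Or.inl hf)
      · subst hr3
        have hg2 : pvGrabUntil ')' r3 = none := by
          rw [pvGrabUntil_spec, if_neg hnr]
        rw [pvScan_paren_none hgrab hg2]
        exact ih _ hxs (Or.inr ⟨r3, rfl, hnr⟩)
    · rw [List.cons_append, pvScan_skip hx]
      exact ih rest2 hxs hfail

-- the main loop correspondence

lemma pvFindFrom_char (text : String) (sub : String) (c : Char) (hsub : sub.toList = [c])
    (k : Nat) (hk : k ≤ text.toList.length) :
    PySem.Str.findFrom text sub ((k : Nat) : Int) none =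
      (if c ∈ text.toList.drop k
       then (((k + ((text.toList.drop k).takeWhile (· ≠ c)).length : Nat)) : Int)
       else -1) := by
  rw [PySem.Str.findFrom_eq, hsub, PySem.Chars.findFrom_natCast _ _ _ hk, pvFind_singleton]
  by_cases h : c ∈ text.toList.drop k
  · have hne : ¬ ((((text.toList.drop k).takeWhile (· ≠ c)).length : Int) = -1) := by omega
    rw [if_pos h, if_pos h, if_neg hne]
    push_cast
    ring
  · rw [if_neg h, if_neg h, if_pos rfl]

lemma pvLoopA_eq (text : String) : ∀ (fuel k : Nat) (links : List (String × String)),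
    k ≤ text.toList.length → text.toList.length - k < fuel →
    pvLoopA text fuel ((k : Nat) : Int) links = links ++ pvScan (text.toList.drop k) := by
  intro fuel
  induction fuel with
  | zero => intro k links hk hf; omega
  | succ fuel ih =>
    intro k links hk hf
    have hlen : PySem.Str.len text = (text.toList.length : Int) := by simp
    by_cases hkn : k < text.toList.length
    case neg =>
      have hdrop : text.toList.drop k = [] := List.drop_eq_nil_of_le (Nat.le_of_not_lt hkn)
      simp only [pvLoopA]
      rw [if_neg (by rw [hlen]; exact_mod_cast hkn), hdrop, pvScan_nil, List.append_nil]
    case pos =>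
      have hfb := pvFindFrom_char text "[" '[' rfl k hk
      by_cases hmem1 : '[' ∈ text.toList.drop k
      case neg =>
        rw [if_neg hmem1] at hfb
        simp only [pvLoopA]
        rw [if_pos (by rw [hlen]; exact_mod_cast hkn), hfb, if_pos rfl,
            pvScan_eq_nil_of_not_mem hmem1, List.append_nil]
      case pos =>
        rw [if_pos hmem1] at hfb
        obtain ⟨tail, hdw1⟩ : ∃ tail,
            (text.toList.drop k).dropWhile (· ≠ '[') = '[' :: tail :=
          ⟨_, pvDropWhile_mem hmem1⟩
        have hdropbsn :
            text.toList.drop (k + ((text.toList.drop k).takeWhile (· ≠ '[')).length)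
              = '[' :: tail := by
          rw [← List.drop_drop, ← pvDropWhile_eq_drop]
          exact hdw1
        have hbsn_lt : k + ((text.toList.drop k).takeWhile (· ≠ '[')).length
            < text.toList.length := by
          by_contra hc
          have h0 := List.drop_eq_nil_of_le
            (as := text.toList)
            (i := k + ((text.toList.drop k).takeWhile (· ≠ '[')).length) (by omega)
          rw [hdropbsn] at h0
          simp at h0
        have hdrop_bsn1 :
            text.toList.drop (k + ((text.toList.drop k).takeWhile (· ≠ '[')).length + 1)
              = tail := by
          rw [← List.drop_drop, hdropbsn, List.drop_one, List.tail_cons]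
        have hne1 : ((k + ((text.toList.drop k).takeWhile (· ≠ '[')).length : Nat) : Int)
            ≠ -1 := by push_cast; omega
        have hcast1 : ((k + ((text.toList.drop k).takeWhile (· ≠ '[')).length : Nat) : Int) + 1
            = ((k + ((text.toList.drop k).takeWhile (· ≠ '[')).length + 1 : Nat) : Int) := by
          push_cast; ring
        have hscan : pvScan (text.toList.drop k) = pvScan ('[' :: tail) := by
          rw [show text.toList.drop k
                = (text.toList.drop k).takeWhile (· ≠ '[') ++ ('[' :: tail) from by
                rw [← hdw1, List.takeWhile_append_dropWhile],
              pvScan_append_of_not_mem _ pvNotMem_takeWhile]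
        have hf2 := pvFindFrom_char text "]" ']' rfl
          (k + ((text.toList.drop k).takeWhile (· ≠ '[')).length + 1) (by omega)
        rw [hdrop_bsn1] at hf2
        by_cases hmem2 : ']' ∈ tail
        case neg =>
          rw [if_neg hmem2] at hf2
          have hg : pvGrabUntil ']' tail = none := by rw [pvGrabUntil_spec, if_neg hmem2]
          simp only [pvLoopA]
          rw [if_pos (by rw [hlen]; exact_mod_cast hkn), hfb, if_neg hne1, hcast1, hf2,
              if_pos rfl,
              ih (k + ((text.toList.drop k).takeWhile (· ≠ '[')).length + 1) links
                (by omega) (by omega),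
              hdrop_bsn1, hscan, pvScan_bracket_none hg]
        case pos =>
          rw [if_pos hmem2] at hf2
          obtain ⟨txt, rest2, hgrab, htail_split, hnotmem_txt, htlen, hrest2⟩ :
              ∃ txt rest2, pvGrabUntil ']' tail = some (txt, rest2) ∧
                tail = txt ++ ']' :: rest2 ∧ ']' ∉ txt ∧
                txt.length = (tail.takeWhile (· ≠ ']')).length ∧
                rest2 = (tail.dropWhile (· ≠ ']')).tail := by
            refine ⟨_, _, by rw [pvGrabUntil_spec, if_pos hmem2], ?_, pvNotMem_takeWhile, rfl, rfl⟩
            conv_lhs => rw [← List.takeWhile_append_dropWhile (p := (· ≠ ']')) (l := tail),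
              pvDropWhile_mem hmem2]
          have hdrop_ben :
              text.toList.drop (k + ((text.toList.drop k).takeWhile (· ≠ '[')).length + 1
                + (tail.takeWhile (· ≠ ']')).length) = ']' :: rest2 := by
            rw [← List.drop_drop, hdrop_bsn1, ← pvDropWhile_eq_drop, pvDropWhile_mem hmem2,
                ← hrest2]
          have hben_lt : k + ((text.toList.drop k).takeWhile (· ≠ '[')).length + 1
              + (tail.takeWhile (· ≠ ']')).length < text.toList.length := by
            by_contra hc
            have h0 := List.drop_eq_nil_of_le (as := text.toList)
              (i := k + ((text.toList.drop k).takeWhile (· ≠ '[')).length + 1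
                + (tail.takeWhile (· ≠ ']')).length) (by omega)
            rw [hdrop_ben] at h0
            simp at h0
          have hdrop_ben1 :
              text.toList.drop (k + ((text.toList.drop k).takeWhile (· ≠ '[')).length + 1
                + (tail.takeWhile (· ≠ ']')).length + 1) = rest2 := by
            rw [← List.drop_drop, hdrop_ben, List.drop_one, List.tail_cons]
          have hne2 : ((k + ((text.toList.drop k).takeWhile (· ≠ '[')).length + 1
              + (tail.takeWhile (· ≠ ']')).length : Nat) : Int) ≠ -1 := by push_cast; omega
          have hcast2 : ((k + ((text.toList.drop k).takeWhile (· ≠ '[')).length + 1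
              + (tail.takeWhile (· ≠ ']')).length : Nat) : Int) + 1
              = ((k + ((text.toList.drop k).takeWhile (· ≠ '[')).length + 1
              + (tail.takeWhile (· ≠ ']')).length + 1 : Nat) : Int) := by push_cast; ring
          have hpg : PySem.Str.pyGet? text
              (((k + ((text.toList.drop k).takeWhile (· ≠ '[')).length + 1
                + (tail.takeWhile (· ≠ ']')).length : Nat) : Int) + 1) = rest2.head? := by
            rw [hcast2, PySem.Str.pyGet?_natCast, ← List.head?_drop, hdrop_ben1]
          have hlen_rest2 : text.toList.length
              = k + ((text.toList.drop k).takeWhile (· ≠ '[')).length + 1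
                + (tail.takeWhile (· ≠ ']')).length + 1 + rest2.length := by
            have h0 := congrArg List.length hdrop_ben1
            rw [List.length_drop] at h0
            omega
          cases rest2 with
          | nil =>
            have hCfail : ¬ (((k + ((text.toList.drop k).takeWhile (· ≠ '[')).length + 1
                + (tail.takeWhile (· ≠ ']')).length : Nat) : Int) + 1 < PySem.Str.len text ∧
                PySem.Str.pyGet? text
                  (((k + ((text.toList.drop k).takeWhile (· ≠ '[')).length + 1
                    + (tail.takeWhile (· ≠ ']')).length : Nat) : Int) + 1) = some '(') := by
              rintro ⟨hlt, -⟩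
              rw [hlen, hcast2] at hlt
              simp only [List.length_nil] at hlen_rest2
              have hlt' : k + ((text.toList.drop k).takeWhile (· ≠ '[')).length + 1
                  + (tail.takeWhile (· ≠ ']')).length + 1 < text.toList.length := by
                exact_mod_cast hlt
              omega
            simp only [pvLoopA]
            rw [if_pos (by rw [hlen]; exact_mod_cast hkn), hfb, if_neg hne1, hcast1, hf2,
                if_neg hne2, if_neg hCfail, hcast2,
                ih (k + ((text.toList.drop k).takeWhile (· ≠ '[')).length + 1
                  + (tail.takeWhile (· ≠ ']')).length + 1) links (by omega)
                  (by simp only [List.length_nil] at hlen_rest2; omega),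
                hdrop_ben1, hscan,
                pvScan_bracket_noparen hgrab (fun r3 h0 => by exact absurd h0 (by simp)),
                htail_split,
                pvScan_fail_skip _ hnotmem_txt (Or.inl (fun r3 h0 => by exact absurd h0 (by simp))),
                pvScan_skip (show (']' : Char) ≠ '[' by decide)]
          | cons c2 rest3 =>
            by_cases hc2 : c2 = '('
            · subst hc2
              have hCpos : (((k + ((text.toList.drop k).takeWhile (· ≠ '[')).length + 1
                  + (tail.takeWhile (· ≠ ']')).length : Nat) : Int) + 1 < PySem.Str.len text ∧
                  PySem.Str.pyGet? text
                    (((k + ((text.toList.drop k).takeWhile (· ≠ '[')).length + 1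
                      + (tail.takeWhile (· ≠ ']')).length : Nat) : Int) + 1) = some '(') := by
                refine ⟨?_, by rw [hpg]; rfl⟩
                rw [hlen, hcast2]
                simp only [List.length_cons] at hlen_rest2
                have : k + ((text.toList.drop k).takeWhile (· ≠ '[')).length + 1
                    + (tail.takeWhile (· ≠ ']')).length + 1 < text.toList.length := by omega
                exact_mod_cast this
              have hdrop_ben2 :
                  text.toList.drop (k + ((text.toList.drop k).takeWhile (· ≠ '[')).length + 1
                    + (tail.takeWhile (· ≠ ']')).length + 1 + 1) = rest3 := by
                rw [← List.drop_drop, hdrop_ben1, List.drop_one, List.tail_cons]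
              have hcast3 : ((k + ((text.toList.drop k).takeWhile (· ≠ '[')).length + 1
                  + (tail.takeWhile (· ≠ ']')).length : Nat) : Int) + 2
                  = ((k + ((text.toList.drop k).takeWhile (· ≠ '[')).length + 1
                  + (tail.takeWhile (· ≠ ']')).length + 1 + 1 : Nat) : Int) := by
                push_cast; ring
              have hf3 := pvFindFrom_char text ")" ')' rfl
                (k + ((text.toList.drop k).takeWhile (· ≠ '[')).length + 1
                  + (tail.takeWhile (· ≠ ']')).length + 1 + 1)
                (by simp only [List.length_cons] at hlen_rest2; omega)
              rw [hdrop_ben2] at hf3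
              by_cases hmem3 : ')' ∈ rest3
              case neg =>
                rw [if_neg hmem3] at hf3
                have hg2 : pvGrabUntil ')' rest3 = none := by
                  rw [pvGrabUntil_spec, if_neg hmem3]
                simp only [pvLoopA]
                rw [if_pos (by rw [hlen]; exact_mod_cast hkn), hfb, if_neg hne1, hcast1, hf2,
                    if_neg hne2, if_pos hCpos, hcast3, hf3, if_pos rfl, hcast2,
                    ih (k + ((text.toList.drop k).takeWhile (· ≠ '[')).length + 1
                      + (tail.takeWhile (· ≠ ']')).length + 1) links (by omega)
                      (by simp only [List.length_cons] at hlen_rest2; omega),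
                    hdrop_ben1, hscan, pvScan_paren_none hgrab hg2,
                    htail_split,
                    pvScan_fail_skip _ hnotmem_txt (Or.inr ⟨rest3, rfl, hmem3⟩),
                    pvScan_skip (show (']' : Char) ≠ '[' by decide)]
              case pos =>
                rw [if_pos hmem3] at hf3
                obtain ⟨url, rest4, hgrab2, hr3_split, hulen, hrest4⟩ :
                    ∃ url rest4, pvGrabUntil ')' rest3 = some (url, rest4) ∧
                      rest3 = url ++ ')' :: rest4 ∧
                      url.length = (rest3.takeWhile (· ≠ ')')).length ∧
                      rest4 = (rest3.dropWhile (· ≠ ')')).tail := by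
                  refine ⟨_, _, by rw [pvGrabUntil_spec, if_pos hmem3], ?_, rfl, rfl⟩
                  conv_lhs => rw [← List.takeWhile_append_dropWhile (p := (· ≠ ')')) (l := rest3),
                    pvDropWhile_mem hmem3]
                have hdrop_pen :
                    text.toList.drop (k + ((text.toList.drop k).takeWhile (· ≠ '[')).length + 1
                      + (tail.takeWhile (· ≠ ']')).length + 1 + 1
                      + (rest3.takeWhile (· ≠ ')')).length) = ')' :: rest4 := by
                  rw [← List.drop_drop, hdrop_ben2, ← pvDropWhile_eq_drop, pvDropWhile_mem hmem3,
                      ← hrest4]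
                have hpen_lt : k + ((text.toList.drop k).takeWhile (· ≠ '[')).length + 1
                    + (tail.takeWhile (· ≠ ']')).length + 1 + 1
                    + (rest3.takeWhile (· ≠ ')')).length < text.toList.length := by
                  by_contra hc
                  have h0 := List.drop_eq_nil_of_le (as := text.toList)
                    (i := k + ((text.toList.drop k).takeWhile (· ≠ '[')).length + 1
                      + (tail.takeWhile (· ≠ ']')).length + 1 + 1
                      + (rest3.takeWhile (· ≠ ')')).length) (by omega)
                  rw [hdrop_pen] at h0
                  simp at h0
                have hdrop_pen1 :
                    text.toList.drop (k + ((text.toList.drop k).takeWhile (· ≠ '[')).length + 1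
                      + (tail.takeWhile (· ≠ ']')).length + 1 + 1
                      + (rest3.takeWhile (· ≠ ')')).length + 1) = rest4 := by
                  rw [← List.drop_drop, hdrop_pen, List.drop_one, List.tail_cons]
                have hne3 : ((k + ((text.toList.drop k).takeWhile (· ≠ '[')).length + 1
                    + (tail.takeWhile (· ≠ ']')).length + 1 + 1
                    + (rest3.takeWhile (· ≠ ')')).length : Nat) : Int) ≠ -1 := by
                  push_cast; omega
                have hcast4 : ((k + ((text.toList.drop k).takeWhile (· ≠ '[')).length + 1
                    + (tail.takeWhile (· ≠ ']')).length + 1 + 1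
                    + (rest3.takeWhile (· ≠ ')')).length : Nat) : Int) + 1
                    = ((k + ((text.toList.drop k).takeWhile (· ≠ '[')).length + 1
                    + (tail.takeWhile (· ≠ ']')).length + 1 + 1
                    + (rest3.takeWhile (· ≠ ')')).length + 1 : Nat) : Int) := by
                  push_cast; ring
                have hlt_eq : PySem.Str.slice text
                    (some ((k + ((text.toList.drop k).takeWhile (· ≠ '[')).length + 1 : Nat) : Int))
                    (some ((k + ((text.toList.drop k).takeWhile (· ≠ '[')).length + 1
                      + (tail.takeWhile (· ≠ ']')).length : Nat) : Int)) = String.ofList txt := by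
                  apply String.toList_inj.mp
                  rw [PySem.Str.toList_slice, PySem.Chars.slice_eq_listSlice,
                      PySem.List.slice_natCast, hdrop_bsn1,
                      show k + ((text.toList.drop k).takeWhile (· ≠ '[')).length + 1
                          + (tail.takeWhile (· ≠ ']')).length
                          - (k + ((text.toList.drop k).takeWhile (· ≠ '[')).length + 1)
                          = txt.length from by omega,
                      htail_split]
                  rw [List.take_left, String.toList_ofList]
                have hurl_eq : PySem.Str.slice text
                    (some ((k + ((text.toList.drop k).takeWhile (· ≠ '[')).length + 1
                      + (tail.takeWhile (· ≠ ']')).length + 1 + 1 : Nat) : Int))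
                    (some ((k + ((text.toList.drop k).takeWhile (· ≠ '[')).length + 1
                      + (tail.takeWhile (· ≠ ']')).length + 1 + 1
                      + (rest3.takeWhile (· ≠ ')')).length : Nat) : Int)) = String.ofList url := by
                  apply String.toList_inj.mp
                  rw [PySem.Str.toList_slice, PySem.Chars.slice_eq_listSlice,
                      PySem.List.slice_natCast, hdrop_ben2,
                      show k + ((text.toList.drop k).takeWhile (· ≠ '[')).length + 1
                          + (tail.takeWhile (· ≠ ']')).length + 1 + 1
                          + (rest3.takeWhile (· ≠ ')')).length
                          - (k + ((text.toList.drop k).takeWhile (· ≠ '[')).length + 1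
                            + (tail.takeWhile (· ≠ ']')).length + 1 + 1)
                          = url.length from by omega,
                      hr3_split]
                  rw [List.take_left, String.toList_ofList]
                simp only [pvLoopA]
                rw [if_pos (by rw [hlen]; exact_mod_cast hkn), hfb, if_neg hne1, hcast1, hf2,
                    if_neg hne2, if_pos hCpos, hcast3, hf3, if_neg hne3, hlt_eq, hurl_eq, hcast4,
                    ih (k + ((text.toList.drop k).takeWhile (· ≠ '[')).length + 1
                      + (tail.takeWhile (· ≠ ']')).length + 1 + 1
                      + (rest3.takeWhile (· ≠ ')')).length + 1)
                      (links ++ [(String.ofList txt, String.ofList url)])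
                      (by omega) (by omega),
                    hdrop_pen1, hscan, pvScan_match hgrab hgrab2, List.append_assoc]
                rfl
            · have hCfail : ¬ (((k + ((text.toList.drop k).takeWhile (· ≠ '[')).length + 1
                  + (tail.takeWhile (· ≠ ']')).length : Nat) : Int) + 1 < PySem.Str.len text ∧
                  PySem.Str.pyGet? text
                    (((k + ((text.toList.drop k).takeWhile (· ≠ '[')).length + 1
                      + (tail.takeWhile (· ≠ ']')).length : Nat) : Int) + 1) = some '(') := by
                rintro ⟨-, hpg'⟩
                rw [hpg] at hpg'
                simp at hpg'
                exact hc2 hpg'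
              simp only [pvLoopA]
              rw [if_pos (by rw [hlen]; exact_mod_cast hkn), hfb, if_neg hne1, hcast1, hf2,
                  if_neg hne2, if_neg hCfail, hcast2,
                  ih (k + ((text.toList.drop k).takeWhile (· ≠ '[')).length + 1
                    + (tail.takeWhile (· ≠ ']')).length + 1) links (by omega)
                    (by simp only [List.length_cons] at hlen_rest2; omega),
                  hdrop_ben1, hscan,
                  pvScan_bracket_noparen hgrab
                    (fun r3 h0 => hc2 (List.cons.inj h0).1),
                  htail_split,
                  pvScan_fail_skip _ hnotmem_txt
                    (Or.inl (fun r3 h0 => hc2 (List.cons.inj h0).1)),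
                  pvScan_skip (show (']' : Char) ≠ '[' by decide)]

theorem extract_urls_from_markdown_spec : Claim_equal_extract_urls_from_markdown := by
  intro text _
  unfold Spec_extract_urls_from_markdown extract_urls_from_markdown extract_urls_from_markdown_alt
  have h := pvLoopA_eq text (text.toList.length + 1) 0 [] (by omega) (by omega)
  simpa using h
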